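-- pv_equiv track=rewrite | github.com/entity105/ShipWar | main.py | cort_sorting
-- ===== SOURCE A (Python) =====
-- def cort_sorting(general: list):
--     """Сортировка отсортированного списка кортежей координат. Возвращает список из кортежей кортежей координат"""
--     groups = {}
--     for item in general:
--         key = item[0]
--         if key not in groups:
--             groups[key] = []
--         groups[key].append(item)
--     return [tuple(group) for group in groups.values()]
-- ===== SOURCE B (Python) =====
-- def cort_sorting(general: list):
--     """Group the coordinate tuples by first element, keys in order of first appearance."""
--     keys = list(dict.fromkeys(item[0] for item in general))
--     return [tuple(item for item in general if item[0] == key) for key in keys]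
-- ===== Notes on version B (the rewrite author's own statement) =====
-- stated objective: alternative
-- what changed: Replaces the single accumulating-dict pass with an explicit ordered key list (dict.fromkeys) followed by one filtering pass per key.
import Mathlib
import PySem

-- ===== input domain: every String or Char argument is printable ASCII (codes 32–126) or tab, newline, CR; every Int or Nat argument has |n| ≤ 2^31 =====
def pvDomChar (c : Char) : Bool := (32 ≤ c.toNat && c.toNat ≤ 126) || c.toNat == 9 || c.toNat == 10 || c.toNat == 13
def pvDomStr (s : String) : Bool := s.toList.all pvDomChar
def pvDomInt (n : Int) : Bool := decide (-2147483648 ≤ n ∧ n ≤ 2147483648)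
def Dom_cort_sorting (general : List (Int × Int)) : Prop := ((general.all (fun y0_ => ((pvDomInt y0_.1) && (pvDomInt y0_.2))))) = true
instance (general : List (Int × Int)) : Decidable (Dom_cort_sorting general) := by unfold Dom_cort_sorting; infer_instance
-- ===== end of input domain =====

-- B replaces the accumulating-dict pass by an ordered distinct-key list plus one filtering pass per key (alternative decomposition, same results).

-- ===== PORT A =====
def cort_sorting (general : List (Int × Int)) : List (List (Int × Int)) :=
  let groups := general.foldl (fun d item =>
    let key := item.1
    let d' := if d.contains key then d else d.insert key ([] : List (Int × Int))
    d'.modify key [] (fun g => g ++ [item])) PySem.Dict.empty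
  groups.values

-- ===== PORT B =====
def cort_sorting_alt (general : List (Int × Int)) : List (List (Int × Int)) :=
  let keys := PySem.List.dedup (general.map (fun item => item.1))
  keys.map (fun key => general.filter (fun item => item.1 == key))

-- ===== PRECONDITION & SPEC =====
def Spec_cort_sorting (general : List (Int × Int)) (out : List (List (Int × Int))) : Prop := out = cort_sorting_alt general
instance (general : List (Int × Int)) (out : List (List (Int × Int))) : Decidable (Spec_cort_sorting general out) := by unfold Spec_cort_sorting; infer_instance

-- ===== CLAIM (what is proved, stated in full; the proofs are below) =====
def Claim_equal_cort_sorting : Prop := ∀ (general : List (Int × Int)), Dom_cort_sorting general → Spec_cort_sorting general (cort_sorting general)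

-- ===== LEMMAS AND PROOFS =====

-- The "if key not in groups: groups[key] = []" guard followed by append is just modify.
theorem pv_body_eq (d : PySem.Dict Int (List (Int × Int))) (item : Int × Int) :
    (if d.contains item.1 then d else d.insert item.1 ([] : List (Int × Int))).modify item.1 []
      (fun g => g ++ [item]) = d.modify item.1 [] (fun g => g ++ [item]) := by
  by_cases h : d.contains item.1 = true
  · simp [h]
  · simp only [Bool.not_eq_true] at h
    simp only [h, Bool.false_eq_true, if_false]
    have hg : d.getD item.1 ([] : List (Int × Int)) = [] := by
      simp [PySem.Dict.getD_of_not_contains, h]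
    simp [PySem.Dict.modify, PySem.Dict.getD_insert_self, PySem.Dict.insert_insert_self, hg]

theorem pv_fold_eq (general : List (Int × Int)) :
    general.foldl (fun d item =>
        (if d.contains item.1 then d else d.insert item.1 ([] : List (Int × Int))).modify item.1 []
          (fun g => g ++ [item])) PySem.Dict.empty
      = (general.map (fun it => (it.1, it))).foldl
          (fun d p => d.modify p.1 [] (fun g => g ++ [p.2])) PySem.Dict.empty := by
  rw [List.foldl_map]
  apply PySem.List.foldl_congr_mem
  intro acc x _
  exact pv_body_eq acc x

-- ===== VERDICT =====
theorem cort_sorting_spec : Claim_equal_cort_sorting := by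
  intro general _
  unfold Spec_cort_sorting cort_sorting cort_sorting_alt
  simp only []
  rw [pv_fold_eq]
  set l := general.map (fun it => (it.1, it)) with hl
  have hnd : (l.foldl (fun d p => d.modify p.1 [] (fun g => g ++ [p.2])) PySem.Dict.empty).keys.Nodup := by
    exact PySem.Dict.nodup_keys_foldl_modify_key l Prod.fst _ _ PySem.Dict.empty
      (by simp [PySem.Dict.keys_empty])
  have hkeys : (l.foldl (fun d p => d.modify p.1 [] (fun g => g ++ [p.2])) PySem.Dict.empty).keys
      = PySem.List.dedup (general.map (fun item => item.1)) := by
    rw [PySem.Dict.keys_foldl_modify_key l Prod.fst]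
    simp [PySem.Dict.keys_empty, PySem.Set.update, PySem.Set.ofList_eq_foldl, hl,
      List.map_map, PySem.List.dedup_eq_ofList, Function.comp_def]
  rw [PySem.Dict.values_eq_map_keys _ hnd ([] : List (Int × Int)), hkeys]
  apply List.map_congr_left
  intro k _
  rw [PySem.Dict.getD_foldl_modify_append]
  simp [PySem.Dict.getD_empty, hl, List.filter_map, Function.comp_def]
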